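-- pv_equiv track=rewrite | github.com/danielSanchezQ/advent_of_code_2020 | advent23.py | select_next
-- ===== SOURCE A (Python) =====
-- def select_next(current: int, state: list):
--     while current > 0:
--         current -= 1
--         try:
--             return state.index(current)
--         except ValueError:
--             continue
--     return state.index(max(state))
-- ===== SOURCE B (Python) =====
-- def select_next(current: int, state: list):
--     best_v = -1
--     best_i = -1
--     for i, x in enumerate(state):
--         if 0 <= x < current and x > best_v:
--             best_v, best_i = x, i
--     if best_i >= 0:
--         return best_i
--     return state.index(max(state))
-- ===== Notes on version B (the rewrite author's own statement) =====
-- stated objective: faster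
-- what changed: Replaces the decrement loop with repeated state.index scans by a single pass that tracks the largest value below current together with its first index, falling back to state.index(max(state)).
import Mathlib
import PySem

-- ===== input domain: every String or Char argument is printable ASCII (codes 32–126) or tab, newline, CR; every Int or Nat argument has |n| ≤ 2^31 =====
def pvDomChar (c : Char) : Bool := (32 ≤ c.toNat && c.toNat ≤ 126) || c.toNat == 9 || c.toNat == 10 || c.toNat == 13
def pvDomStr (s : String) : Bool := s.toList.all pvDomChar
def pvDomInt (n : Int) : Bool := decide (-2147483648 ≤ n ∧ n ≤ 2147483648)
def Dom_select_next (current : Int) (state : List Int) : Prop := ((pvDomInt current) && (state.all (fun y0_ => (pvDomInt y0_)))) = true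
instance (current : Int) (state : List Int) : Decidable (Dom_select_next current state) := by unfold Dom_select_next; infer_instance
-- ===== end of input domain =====

-- B replaces A's decrement loop of repeated state.index scans by a single pass that
-- tracks the largest value in [0, current) with its first index (objective: faster).


-- ===== PORT A =====
-- both Pythons end with `state.index(max(state))`; on empty state Python raises
-- ValueError there (excluded by Pre_), the ports return 0 instead
def pyFallback (state : List Int) : Int :=
  match PySem.List.max? state (fun x => x) with
  | some m => ((PySem.List.index? state m).getD 0 : Nat)
  | none => 0

def select_next (current : Int) (state : List Int) : Int :=
  if _h : 0 < current then
    match PySem.List.index? state (current - 1) with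
    | some i => (i : Nat)
    | none => select_next (current - 1) state
  else
    pyFallback state
termination_by current.toNat
decreasing_by omega

-- ===== PORT B =====
-- the body of Source B's for-loop: update (best_v, best_i) when x qualifies and beats best_v
def stepB (current : Int) (b ix : Int × Int) : Int × Int :=
  if 0 ≤ ix.2 ∧ ix.2 < current ∧ b.1 < ix.2 then (ix.2, ix.1) else b

def select_next_alt (current : Int) (state : List Int) : Int :=
  let p := (PySem.List.enumerate state 0).foldl (stepB current) (-1, -1)
  if 0 ≤ p.2 then p.2 else pyFallback state

-- ===== PRECONDITION & SPEC =====
-- Pre_ excludes the empty list, on which both Pythons raise ValueError (max() of empty sequence)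
def Pre_select_next (current : Int) (state : List Int) : Prop := state ≠ []
instance (current : Int) (state : List Int) : Decidable (Pre_select_next current state) := by unfold Pre_select_next; infer_instance
def pvWitness_select_next : Int × List Int := (3, [5, 1, 2])

def Spec_select_next (current : Int) (state : List Int) (out : Int) : Prop := out = select_next_alt current state
instance (current : Int) (state : List Int) (out : Int) : Decidable (Spec_select_next current state out) := by unfold Spec_select_next; infer_instance

-- ===== CLAIM (what is proved, stated in full; the proofs are below) =====
def Claim_equal_select_next : Prop := ∀ (current : Int) (state : List Int), Dom_select_next current state → Pre_select_next current state → Spec_select_next current state (select_next current state)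

-- ===== LEMMAS AND PROOFS =====

-- does x qualify: 0 ≤ x < current
def qual (current x : Int) : Bool := decide (0 ≤ x) && decide (x < current)

-- common characterisation of both ports: first index of the largest qualifying value, else fallback
def charFn (current : Int) (state : List Int) : Int :=
  match PySem.List.max? (state.filter (qual current)) (fun x => x) with
  | some v => ((PySem.List.index? state v).getD 0 : Nat)
  | none => pyFallback state

-- what B's fold computes
def specB (current : Int) (l : List Int) : Int × Int :=
  match PySem.List.max? (l.filter (qual current)) (fun x => x) with
  | some v => (v, ((PySem.List.index? l v).getD 0 : Nat))
  | none => (-1, -1)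

theorem foldB (current : Int) (l : List Int) :
    (PySem.List.enumerate l 0).foldl (stepB current) (-1, -1) = specB current l := by
  induction l using List.reverseRecOn with
  | nil =>
    simp only [PySem.List.enumerate_nil, List.foldl_nil]
    unfold specB
    simp only [List.filter_nil]
    rw [(PySem.List.max?_eq_none_iff _ _).mpr rfl]
  | append_singleton l x ih =>
    rw [PySem.List.enumerate_append, List.foldl_append, ih]
    simp only [PySem.List.enumerate_cons, PySem.List.enumerate_nil, List.foldl_cons,
      List.foldl_nil, zero_add]
    by_cases hq : qual current x
    · have hx : 0 ≤ x ∧ x < current := by simpa [qual] using hq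
      have hfilt : (l ++ [x]).filter (qual current) = l.filter (qual current) ++ [x] := by
        simp [List.filter_append, hq]
      cases hfl : l.filter (qual current) with
      | nil =>
        have hxl : x ∉ l := fun hxl => by
          have := List.filter_eq_nil_iff.mp hfl x hxl
          exact this hq
        have h1 : specB current l = (-1, -1) := by
          unfold specB
          rw [hfl, (PySem.List.max?_eq_none_iff _ _).mpr rfl]
        have hstep : stepB current (-1, -1) ((l.length : Int), x) = (x, (l.length : Int)) := by
          unfold stepB
          rw [if_pos ⟨hx.1, hx.2, by omega⟩]
        have e2 : specB current (l ++ [x]) =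
            (x, (((PySem.List.index? (l ++ [x]) x).getD 0 : Nat) : Int)) := by
          unfold specB
          rw [hfilt, hfl, List.nil_append, PySem.List.max?_id_cons]
          simp only [List.foldl_nil]
        rw [h1, hstep, e2, PySem.List.index?_append_singleton_self l x hxl]
        rfl
      | cons h t =>
        have hmax : PySem.List.max? (l.filter (qual current)) (fun y => y) =
            some (List.foldl max h t) := by
          rw [hfl, PySem.List.max?_id_cons]
        have hvmem := PySem.List.max?_mem hmax
        have hvl : List.foldl max h t ∈ l := (List.mem_filter.mp hvmem).1
        have h1 : specB current l =
            (List.foldl max h t,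
              (((PySem.List.index? l (List.foldl max h t)).getD 0 : Nat) : Int)) := by
          unfold specB
          rw [hmax]
        have hmax2 : PySem.List.max? ((l ++ [x]).filter (qual current)) (fun y => y) =
            some (max (List.foldl max h t) x) := by
          rw [hfilt, hfl, List.cons_append, PySem.List.max?_id_cons, List.foldl_append]
          simp only [List.foldl_cons, List.foldl_nil]
        by_cases hcmp : List.foldl max h t < x
        · have hxnl : x ∉ l := fun hxl => by
            have hxf : x ∈ l.filter (qual current) := List.mem_filter.mpr ⟨hxl, hq⟩
            have := PySem.List.max?_isMax hmax x hxf
            simp only at this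
            omega
          have hstep : stepB current
              (List.foldl max h t,
                (((PySem.List.index? l (List.foldl max h t)).getD 0 : Nat) : Int))
              ((l.length : Int), x) = (x, (l.length : Int)) := by
            unfold stepB
            rw [if_pos ⟨hx.1, hx.2, hcmp⟩]
          have e2 : specB current (l ++ [x]) =
              (x, (((PySem.List.index? (l ++ [x]) x).getD 0 : Nat) : Int)) := by
            unfold specB
            rw [hmax2, max_eq_right (le_of_lt hcmp)]
          rw [h1, hstep, e2, PySem.List.index?_append_singleton_self l x hxnl]
          rfl
        · have hstep : stepB current
              (List.foldl max h t,
                (((PySem.List.index? l (List.foldl max h t)).getD 0 : Nat) : Int))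
              ((l.length : Int), x) =
              (List.foldl max h t,
                (((PySem.List.index? l (List.foldl max h t)).getD 0 : Nat) : Int)) := by
            unfold stepB
            rw [if_neg]
            rintro ⟨-, -, hlt⟩
            exact hcmp hlt
          have e2 : specB current (l ++ [x]) =
              (List.foldl max h t,
                (((PySem.List.index? (l ++ [x]) (List.foldl max h t)).getD 0 : Nat) : Int)) := by
            unfold specB
            rw [hmax2, max_eq_left (not_lt.mp hcmp)]
          rw [h1, hstep, e2, PySem.List.index?_append_of_mem [x] hvl]
    · have hnq : ¬ (0 ≤ x ∧ x < current) := by simpa [qual] using hq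
      have hfilt : (l ++ [x]).filter (qual current) = l.filter (qual current) := by
        simp [List.filter_append, hq]
      have hstep : stepB current (specB current l) ((l.length : Int), x) = specB current l := by
        unfold stepB
        rw [if_neg]
        rintro ⟨h1, h2, -⟩
        exact hnq ⟨h1, h2⟩
      rw [hstep]
      cases hm : PySem.List.max? (l.filter (qual current)) (fun y => y) with
      | none =>
        have e1 : specB current l = (-1, -1) := by
          unfold specB
          rw [hm]
        have e2 : specB current (l ++ [x]) = (-1, -1) := by
          unfold specB
          rw [hfilt, hm]
        rw [e1, e2]
      | some v =>
        have hvl : v ∈ l := (List.mem_filter.mp (PySem.List.max?_mem hm)).1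
        have e1 : specB current l =
            (v, (((PySem.List.index? l v).getD 0 : Nat) : Int)) := by
          unfold specB
          rw [hm]
        have e2 : specB current (l ++ [x]) =
            (v, (((PySem.List.index? (l ++ [x]) v).getD 0 : Nat) : Int)) := by
          unfold specB
          rw [hfilt, hm]
        rw [e1, e2, PySem.List.index?_append_of_mem [x] hvl]

theorem B_char (current : Int) (state : List Int) :
    select_next_alt current state = charFn current state := by
  unfold select_next_alt
  rw [foldB]
  cases hm : PySem.List.max? (state.filter (qual current)) (fun x => x) with
  | none =>
    have e1 : specB current state = (-1, -1) := by
      unfold specB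
      rw [hm]
    have e2 : charFn current state = pyFallback state := by
      unfold charFn
      rw [hm]
    rw [e1, e2]
    rfl
  | some v =>
    have e1 : specB current state =
        (v, (((PySem.List.index? state v).getD 0 : Nat) : Int)) := by
      unfold specB
      rw [hm]
    have e2 : charFn current state =
        (((PySem.List.index? state v).getD 0 : Nat) : Int) := by
      unfold charFn
      rw [hm]
    rw [e1, e2]
    simp

theorem A_char : ∀ (n : Nat) (current : Int), current.toNat = n →
    ∀ state, select_next current state = charFn current state := by
  intro n
  induction n with
  | zero =>
    intro current h state
    have hc : ¬ 0 < current := by omega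
    rw [select_next, dif_neg hc]
    have hf : state.filter (qual current) = [] :=
      List.filter_eq_nil_iff.mpr (fun a _ => by simp [qual]; omega)
    unfold charFn
    rw [hf, (PySem.List.max?_eq_none_iff _ _).mpr rfl]
  | succ m ih =>
    intro current h state
    have hc : 0 < current := by omega
    rw [select_next, dif_pos hc]
    cases hidx : PySem.List.index? state (current - 1) with
    | none =>
      have hnm : (current - 1) ∉ state := (PySem.List.index?_eq_none_iff _ _).mp hidx
      have hfe : state.filter (qual (current - 1)) = state.filter (qual current) := by
        apply List.filter_congr
        intro x hx
        have hne : x ≠ current - 1 := fun e => hnm (e ▸ hx)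
        unfold qual
        rw [show (decide (x < current - 1)) = (decide (x < current)) from
          decide_eq_decide.mpr (by omega)]
      have e1 : charFn (current - 1) state = charFn current state := by
        unfold charFn
        rw [hfe]
      rw [ih (current - 1) (by omega) state, e1]
    | some i =>
      have hmem : (current - 1) ∈ state :=
        (PySem.List.index?_isSome_iff _ _).mp (by rw [hidx]; rfl)
      have hcf : (current - 1) ∈ state.filter (qual current) :=
        List.mem_filter.mpr ⟨hmem, by simp [qual]; omega⟩
      cases hm : PySem.List.max? (state.filter (qual current)) (fun x => x) with
      | none =>
        rw [(PySem.List.max?_eq_none_iff _ _).mp hm] at hcf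
        exact absurd hcf (List.not_mem_nil)
      | some v =>
        have hvmem := PySem.List.max?_mem hm
        have hv1 : v ≤ current - 1 := by
          have := (List.mem_filter.mp hvmem).2
          simp [qual] at this
          omega
        have hv2 : current - 1 ≤ v := by
          have := PySem.List.max?_isMax hm _ hcf
          simpa using this
        have hveq : v = current - 1 := le_antisymm hv1 hv2
        have e2 : charFn current state =
            (((PySem.List.index? state (current - 1)).getD 0 : Nat) : Int) := by
          unfold charFn
          rw [hm, hveq]
        rw [e2, hidx]
        rfl

-- ===== VERDICT (by name: the statement is the Claim_ definition above) =====
theorem select_next_spec : Claim_equal_select_next := by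
  intro current state _ _
  unfold Spec_select_next
  rw [A_char current.toNat current rfl state, B_char]
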